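-- pv_equiv track=rewrite | github.com/pypi-data/pypi-mirror-399 | packages/gnost/gnost-0.1.1-py3-none-any.whl/gnost/scanner/classify.py | classify_lines
-- ===== SOURCE A (Python) =====
-- def classify_lines(lines, comment_prefix):
--     code = comments = blanks = 0
--
--     for line in lines:
--         stripped = line.strip()
--         if not stripped:
--             blanks += 1
--         elif stripped.startswith(comment_prefix):
--             comments += 1
--         else:
--             code += 1
--
--     return code, comments, blanks
-- ===== SOURCE B (Python) =====
-- def classify_lines(lines, comment_prefix):
--     # Multi-pass: materialize, count blanks and comments separately, derive code.
--     lines = list(lines)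
--     total = len(lines)
--     blanks = sum(1 for line in lines if not line.strip())
--     comments = sum(1 for line in lines
--                    if line.strip() and line.strip().startswith(comment_prefix))
--     return total - blanks - comments, comments, blanks
-- ===== Notes on version B (the rewrite author's own statement) =====
-- stated objective: alternative
-- what changed: Replaces A's single branching accumulator loop with three independent passes (length, blank count, comment count) and derives the code count arithmetically as total - blanks - comments.
import Mathlib
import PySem

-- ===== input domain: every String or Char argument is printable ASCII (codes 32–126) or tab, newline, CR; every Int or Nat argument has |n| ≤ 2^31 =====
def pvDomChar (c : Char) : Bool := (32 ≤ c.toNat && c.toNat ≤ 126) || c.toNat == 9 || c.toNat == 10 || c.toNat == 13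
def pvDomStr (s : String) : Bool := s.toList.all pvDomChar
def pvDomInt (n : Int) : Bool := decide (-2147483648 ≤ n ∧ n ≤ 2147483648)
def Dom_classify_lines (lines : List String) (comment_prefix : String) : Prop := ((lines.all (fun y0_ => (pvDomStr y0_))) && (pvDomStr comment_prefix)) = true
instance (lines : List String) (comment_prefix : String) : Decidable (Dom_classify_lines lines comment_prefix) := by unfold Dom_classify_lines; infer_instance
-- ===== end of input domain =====

-- B replaces A's single branching accumulator loop with three independent passes
-- (length, blank count, comment count) and derives code = total - blanks - comments.

-- ===== PORT A =====
-- the body of A's for-loop, one step of the accumulator (code, comments, blanks)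
def pvStep (comment_prefix : String) (st : Int × Int × Int) (line : String) : Int × Int × Int :=
  let stripped := PySem.Str.strip line
  if stripped = "" then (st.1, st.2.1, st.2.2 + 1)
  else if PySem.Str.startswith stripped comment_prefix then (st.1, st.2.1 + 1, st.2.2)
  else (st.1 + 1, st.2.1, st.2.2)

def classify_lines (lines : List String) (comment_prefix : String) : Int × Int × Int :=
  lines.foldl (pvStep comment_prefix) (0, 0, 0)

-- ===== PORT B =====
def pvBlankP (line : String) : Bool := PySem.Str.strip line == ""

def pvCommentP (comment_prefix : String) (line : String) : Bool :=
  !(PySem.Str.strip line == "") && PySem.Str.startswith (PySem.Str.strip line) comment_prefix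

def classify_lines_alt (lines : List String) (comment_prefix : String) : Int × Int × Int :=
  let total : Int := lines.length
  let blanks : Int := lines.countP pvBlankP
  let comments : Int := lines.countP (pvCommentP comment_prefix)
  (total - blanks - comments, comments, blanks)

-- ===== PRECONDITION & SPEC =====
def Spec_classify_lines (lines : List String) (comment_prefix : String) (out : Int × Int × Int) : Prop := out = classify_lines_alt lines comment_prefix
instance (lines : List String) (comment_prefix : String) (out : Int × Int × Int) : Decidable (Spec_classify_lines lines comment_prefix out) := by unfold Spec_classify_lines; infer_instance

-- ===== CLAIM (what is proved, stated in full; the proofs are below) =====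
def Claim_equal_classify_lines : Prop := ∀ (lines : List String) (comment_prefix : String), Dom_classify_lines lines comment_prefix → Spec_classify_lines lines comment_prefix (classify_lines lines comment_prefix)

-- ===== LEMMAS AND PROOFS =====

-- the per-line code predicate implicit in A's final else branch
def pvCodeP (comment_prefix : String) (line : String) : Bool :=
  !(PySem.Str.strip line == "") && !(PySem.Str.startswith (PySem.Str.strip line) comment_prefix)

lemma classify_foldl (comment_prefix : String) (lines : List String) (c m b : Int) :
    lines.foldl (pvStep comment_prefix) (c, m, b)
    = (c + lines.countP (pvCodeP comment_prefix),
       m + lines.countP (pvCommentP comment_prefix),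
       b + lines.countP pvBlankP) := by
  induction lines generalizing c m b with
  | nil => simp
  | cons l ls ih =>
    rw [List.foldl_cons]
    by_cases h1 : PySem.Str.strip l = "" <;>
      by_cases h2 : PySem.Str.startswith (PySem.Str.strip l) comment_prefix = true <;>
      simp only [pvStep, h1, h2, Bool.false_eq_true, ite_true, ite_false,
        List.countP_cons, pvBlankP, pvCommentP, pvCodeP, beq_iff_eq] <;>
      rw [ih] <;>
      simp [pvCodeP, h1] <;>
      push_cast <;> omega

lemma countP_partition (comment_prefix : String) (lines : List String) :
    lines.countP (pvCodeP comment_prefix) + lines.countP (pvCommentP comment_prefix)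
      + lines.countP pvBlankP = lines.length := by
  induction lines with
  | nil => simp
  | cons l ls ih =>
    simp only [List.countP_cons, List.length_cons]
    by_cases h1 : PySem.Str.strip l = "" <;>
      by_cases h2 : PySem.Chars.startswith (PySem.Chars.strip l.toList) comment_prefix.toList = true <;>
      simp [pvBlankP, pvCommentP, pvCodeP, h1, h2] <;> try omega

-- ===== VERDICT (by name: the statement is the Claim_ definition above) =====
theorem classify_lines_spec : Claim_equal_classify_lines := by
  intro lines comment_prefix _
  unfold Spec_classify_lines classify_lines classify_lines_alt
  rw [classify_foldl]
  have h := countP_partition comment_prefix lines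
  refine Prod.ext ?_ (Prod.ext ?_ ?_) <;> simp <;> push_cast <;> omega
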